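-- pv_equiv track=rewrite | github.com/Andy7475/audio-language-trainer | src/phrase.py | get_phrase_indices
-- ===== SOURCE A (Python) =====
-- def get_phrase_indices(known_phrases: list[str], all_phrases: list[str]) -> set[int]:
--     """
--     Get the indices of known phrases within a list of all phrases, skipping any that aren't found.
--
--     Args:
--         known_phrases: List of phrases to find indices for
--         all_phrases: Master list of phrases to search within
--
--     Returns:
--         Set of indices where known phrases were found
--     """
--     indices = set()
--     for phrase in known_phrases:
--         try:
--             idx = all_phrases.index(phrase)
--             indices.add(idx)
--         except ValueError:
--             continue
--
--     return indices
-- ===== SOURCE B (Python) =====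
-- def get_phrase_indices(known_phrases: list[str], all_phrases: list[str]) -> set[int]:
--     # Sort (phrase, position) pairs once, then binary-search each known phrase;
--     # the tuple order makes the leftmost match carry the smallest position.
--     pairs = sorted((p, i) for i, p in enumerate(all_phrases))
--     keys = [p for p, _ in pairs]
--     indices = set()
--     for phrase in known_phrases:
--         lo, hi = 0, len(keys)
--         while lo < hi:
--             mid = (lo + hi) // 2
--             if keys[mid] < phrase:
--                 lo = mid + 1
--             else:
--                 hi = mid
--         if lo < len(keys) and keys[lo] == phrase:
--             indices.add(pairs[lo][1])
--     return indices
-- ===== Notes on version B (the rewrite author's own statement) =====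
-- stated objective: faster
-- what changed: B sorts (phrase, position) pairs of the master list once and binary-searches each known phrase, replacing A's per-phrase linear .index scan.
import Mathlib
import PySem

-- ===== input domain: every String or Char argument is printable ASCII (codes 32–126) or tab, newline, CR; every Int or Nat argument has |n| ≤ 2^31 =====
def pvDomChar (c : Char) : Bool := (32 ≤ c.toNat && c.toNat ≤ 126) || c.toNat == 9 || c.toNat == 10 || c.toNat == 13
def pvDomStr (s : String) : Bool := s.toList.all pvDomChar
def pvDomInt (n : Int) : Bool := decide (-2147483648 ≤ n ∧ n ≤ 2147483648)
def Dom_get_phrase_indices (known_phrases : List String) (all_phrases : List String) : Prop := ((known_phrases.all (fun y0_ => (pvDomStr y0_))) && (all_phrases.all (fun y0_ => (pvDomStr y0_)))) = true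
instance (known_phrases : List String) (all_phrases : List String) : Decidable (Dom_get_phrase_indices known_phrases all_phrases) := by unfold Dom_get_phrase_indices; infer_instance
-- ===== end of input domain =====

-- B sorts (phrase, position) pairs of the master list once and binary-searches each known phrase
-- instead of A's per-phrase linear .index scan (objective: faster).

-- ===== PORT A =====
def get_phrase_indices (known_phrases : List String) (all_phrases : List String) : List Int :=
  known_phrases.foldl (fun indices phrase =>
    match PySem.List.index? all_phrases phrase with
    | some idx => PySem.Set.add indices (idx : Int)
    | none => indices) PySem.Set.empty

-- ===== PORT B =====
-- `sorted((p, i) for i, p in enumerate(all_phrases))`: Python compares the tuples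
-- lexicographically, which is exactly the `Lex (String × Int)` order (String `<` is
-- code-point lexicographic, as in Python).
def pvPairs (all_phrases : List String) : List (String × Int) :=
  PySem.List.sorted ((PySem.List.enumerate all_phrases 0).map (fun ip => (ip.2, ip.1)))
    (fun p => toLex p) false

-- `keys = [p for p, _ in pairs]`
def pvKeys (all_phrases : List String) : List String :=
  (pvPairs all_phrases).map Prod.fst

-- the hand-written `while lo < hi` bisect-left loop of Source B, step for step
def bisectGo (keys : List String) (phrase : String) (lo hi : Nat) : Nat :=
  if lo < hi then
    let mid := (lo + hi) / 2
    if keys.getD mid "" < phrase then bisectGo keys phrase (mid + 1) hi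
    else bisectGo keys phrase lo mid
  else lo
termination_by hi - lo
decreasing_by all_goals omega

def get_phrase_indices_alt (known_phrases : List String) (all_phrases : List String) : List Int :=
  let pairs := pvPairs all_phrases
  let keys := pvKeys all_phrases
  known_phrases.foldl (fun indices phrase =>
    let lo := bisectGo keys phrase 0 keys.length
    if lo < keys.length ∧ keys.getD lo "" = phrase then
      PySem.Set.add indices (pairs.getD lo ("", 0)).2
    else indices) PySem.Set.empty

-- ===== PRECONDITION & SPEC =====
def Spec_get_phrase_indices (known_phrases : List String) (all_phrases : List String) (out : List Int) : Prop := out = get_phrase_indices_alt known_phrases all_phrases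
instance (known_phrases : List String) (all_phrases : List String) (out : List Int) : Decidable (Spec_get_phrase_indices known_phrases all_phrases out) := by unfold Spec_get_phrase_indices; infer_instance

-- ===== CLAIM (what is proved, stated in full; the proofs are below) =====
def Claim_equal_get_phrase_indices : Prop := ∀ (known_phrases : List String) (all_phrases : List String), Dom_get_phrase_indices known_phrases all_phrases → Spec_get_phrase_indices known_phrases all_phrases (get_phrase_indices known_phrases all_phrases)

-- ===== LEMMAS AND PROOFS =====

/-- getD is monotone along a `Pairwise (· ≤ ·)` list (indices in range). -/
theorem getD_mono_of_pairwise (keys : List String) (hpw : keys.Pairwise (· ≤ ·))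
    {i j : Nat} (hij : i ≤ j) (hj : j < keys.length) :
    keys.getD i "" ≤ keys.getD j "" := by
  rcases eq_or_lt_of_le hij with rfl | hlt
  · exact le_refl _
  · rw [List.getD_eq_getElem _ _ (lt_trans hlt hj), List.getD_eq_getElem _ _ hj]
    exact List.pairwise_iff_getElem.mp hpw i j _ _ hlt

/-- Membership characterisation of the sorted pair list. -/
theorem mem_pvPairs (all_phrases : List String) (p : String × Int) :
    p ∈ pvPairs all_phrases ↔ ∃ k, ∃ _ : k < all_phrases.length, p = (all_phrases[k], (k : Int)) := by
  rw [pvPairs, (PySem.List.sorted_perm _ _ _).mem_iff, List.mem_map]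
  constructor
  · rintro ⟨ip, hip, rfl⟩
    rcases (PySem.List.mem_enumerate_iff _ _ _).mp hip with ⟨k, hk, rfl⟩
    exact ⟨k, hk, by simp⟩
  · rintro ⟨k, hk, rfl⟩
    exact ⟨((k : Int), all_phrases[k]),
      (PySem.List.mem_enumerate_iff _ _ _).mpr ⟨k, hk, by simp⟩, rfl⟩

theorem pvPairs_pairwise (all_phrases : List String) :
    (pvPairs all_phrases).Pairwise (fun a b => (toLex a : Lex (String × Int)) ≤ toLex b) :=
  PySem.List.sorted_pairwise _ _

theorem pvKeys_pairwise (all_phrases : List String) :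
    (pvKeys all_phrases).Pairwise (· ≤ ·) := by
  rw [pvKeys, List.pairwise_map]
  refine (pvPairs_pairwise all_phrases).imp ?_
  intro a b h
  rcases Prod.Lex.le_iff.mp h with h1 | ⟨h1, _⟩
  · exact le_of_lt h1
  · exact le_of_eq h1

/-- Correctness of the hand-written bisect-left loop on a sorted key list. -/
theorem bisectGo_spec (keys : List String) (phrase : String)
    (hpw : keys.Pairwise (· ≤ ·)) :
    ∀ fuel lo hi, hi - lo ≤ fuel → lo ≤ hi → hi ≤ keys.length →
    (∀ q, q < lo → keys.getD q "" < phrase) →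
    (∀ q, hi ≤ q → q < keys.length → phrase ≤ keys.getD q "") →
    lo ≤ bisectGo keys phrase lo hi ∧ bisectGo keys phrase lo hi ≤ hi ∧
    (∀ q, q < bisectGo keys phrase lo hi → keys.getD q "" < phrase) ∧
    (∀ q, bisectGo keys phrase lo hi ≤ q → q < keys.length → phrase ≤ keys.getD q "") := by
  intro fuel
  induction fuel with
  | zero =>
    intro lo hi hf hlh hhl hlow hhigh
    have heq : hi = lo := by omega
    subst heq
    rw [bisectGo, if_neg (by omega)]
    exact ⟨le_refl _, le_refl _, hlow, hhigh⟩
  | succ m ih =>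
    intro lo hi hf hlh hhl hlow hhigh
    by_cases h : lo < hi
    · have hmid1 : lo ≤ (lo + hi) / 2 := by omega
      have hmid2 : (lo + hi) / 2 < hi := by omega
      have hmidlen : (lo + hi) / 2 < keys.length := lt_of_lt_of_le hmid2 hhl
      rw [bisectGo, if_pos h]
      by_cases hc : keys.getD ((lo + hi) / 2) "" < phrase
      · simp only [if_pos hc]
        refine (ih ((lo + hi) / 2 + 1) hi (by omega) (by omega) hhl ?_ hhigh).imp
          (fun h1 => by omega) (fun h2 => h2)
        intro q hq
        exact lt_of_le_of_lt (getD_mono_of_pairwise keys hpw (by omega) hmidlen) hc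
      · simp only [if_neg hc]
        rw [not_lt] at hc
        refine (ih lo ((lo + hi) / 2) (by omega) (by omega) (le_of_lt hmidlen) hlow ?_).imp
          (fun h1 => h1) (fun h2 => ⟨by omega, h2.2.1, h2.2.2⟩)
        intro q hq hql
        exact le_trans hc (getD_mono_of_pairwise keys hpw hq hql)
    · rw [bisectGo, if_neg h]
      have heq : hi = lo := by omega
      subst heq
      exact ⟨le_refl _, le_refl _, hlow, hhigh⟩

theorem length_pvKeys (all_phrases : List String) :
    (pvKeys all_phrases).length = (pvPairs all_phrases).length := by
  simp [pvKeys]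

theorem getD_pvKeys (all_phrases : List String) {q : Nat}
    (hq : q < (pvKeys all_phrases).length) :
    (pvKeys all_phrases).getD q "" = ((pvPairs all_phrases).getD q ("", 0)).1 := by
  rw [List.getD_eq_getElem _ _ hq,
    List.getD_eq_getElem _ _ (by rw [← length_pvKeys]; exact hq)]
  simp [pvKeys]

/-- The per-phrase loop bodies of the two ports agree. -/
theorem step_eq (all_phrases : List String) (phrase : String) (s : List Int) :
    (match PySem.List.index? all_phrases phrase with
     | some idx => PySem.Set.add s (idx : Int)
     | none => s)
    = (if bisectGo (pvKeys all_phrases) phrase 0 (pvKeys all_phrases).length < (pvKeys all_phrases).length ∧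
          (pvKeys all_phrases).getD (bisectGo (pvKeys all_phrases) phrase 0 (pvKeys all_phrases).length) "" = phrase then
        PySem.Set.add s ((pvPairs all_phrases).getD (bisectGo (pvKeys all_phrases) phrase 0 (pvKeys all_phrases).length) ("", 0)).2
      else s) := by
  set keys := pvKeys all_phrases with hkeys
  set r := bisectGo keys phrase 0 keys.length with hr
  obtain ⟨-, hrle, hbelow, habove⟩ :=
    bisectGo_spec keys phrase (pvKeys_pairwise all_phrases) keys.length 0 keys.length
      (by omega) (by omega) (le_refl _) (by omega) (by intro q h1 h2; omega)
  cases hidx : PySem.List.index? all_phrases phrase with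
  | none =>
    have hnm : phrase ∉ all_phrases := (PySem.List.index?_eq_none_iff _ _).mp hidx
    rw [if_neg]
    rintro ⟨hlt, heq⟩
    have hmem : keys.getD r "" ∈ keys := by
      rw [List.getD_eq_getElem _ _ hlt]; exact List.getElem_mem _
    rw [heq] at hmem
    rcases List.mem_map.mp hmem with ⟨p, hp, hfst⟩
    rcases (mem_pvPairs all_phrases p).mp hp with ⟨k, hk, rfl⟩
    exact hnm (hfst ▸ List.getElem_mem hk)
  | some k =>
    obtain ⟨hk, hak, hmin⟩ := PySem.List.getElem_of_index?_eq_some hidx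
    -- the pair (phrase, k) occurs in pvPairs, say at position q
    have hpmem : ((phrase, (k : Int)) : String × Int) ∈ pvPairs all_phrases :=
      (mem_pvPairs all_phrases _).mpr ⟨k, hk, by rw [hak]⟩
    rcases List.getElem_of_mem hpmem with ⟨q, hq, hpq⟩
    have hqk : q < keys.length := by rw [length_pvKeys]; exact hq
    have hkeysq : keys[q] = phrase := by
      simp only [hkeys, pvKeys, List.getElem_map, hpq]
    -- r ≤ q
    have hrq : r ≤ q := by
      by_contra hcon
      have := hbelow q (by omega)
      rw [List.getD_eq_getElem _ _ hqk, hkeysq] at this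
      exact lt_irrefl _ this
    have hrlt : r < keys.length := lt_of_le_of_lt hrq hqk
    -- keys[r] = phrase
    have h1 : phrase ≤ keys.getD r "" := habove r (le_refl _) hrlt
    have h2 : keys.getD r "" ≤ phrase := by
      have := getD_mono_of_pairwise keys (pvKeys_pairwise all_phrases) hrq hqk
      rwa [List.getD_eq_getElem _ _ hqk, hkeysq] at this
    have hkr : keys.getD r "" = phrase := le_antisymm h2 h1
    rw [if_pos ⟨hrlt, hkr⟩]
    -- pairs[r].2 = k
    have hrp : r < (pvPairs all_phrases).length := by rw [← length_pvKeys]; exact hrlt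
    have hfst : ((pvPairs all_phrases).getD r ("", 0)).1 = phrase := by
      rw [← getD_pvKeys all_phrases hrlt]; exact hkr
    have hmem : (pvPairs all_phrases).getD r ("", 0) ∈ pvPairs all_phrases := by
      rw [List.getD_eq_getElem _ _ hrp]; exact List.getElem_mem _
    rcases (mem_pvPairs all_phrases _).mp hmem with ⟨j, hj, hpj⟩
    have haj : all_phrases[j] = phrase := by rw [hpj] at hfst; exact hfst
    have hkj : k ≤ j := by
      by_contra hcon
      exact hmin j (by omega) haj
    -- lex order: pairs[r].2 ≤ pairs[q].2 = k
    have hle : ((pvPairs all_phrases).getD r ("", 0)).2 ≤ (k : Int) := by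
      rcases eq_or_lt_of_le hrq with rfl | hlt
      · rw [List.getD_eq_getElem _ _ hrp, hpq]
      · have hlex := List.pairwise_iff_getElem.mp (pvPairs_pairwise all_phrases) r q hrp hq hlt
        rw [List.getD_eq_getElem _ _ hrp]
        rcases Prod.Lex.le_iff.mp hlex with hcase | ⟨_, hsnd⟩
        · exfalso
          simp only [ofLex_toLex] at hcase
          have : ((pvPairs all_phrases)[r]).1 = phrase := by
            rw [← List.getD_eq_getElem _ ("", 0) hrp]; exact hfst
          rw [this, hpq] at hcase
          exact lt_irrefl _ hcase
        · simp only [ofLex_toLex] at hsnd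
          rw [hpq] at hsnd; exact hsnd
    have hjk : j = k := by
      rw [hpj] at hle
      have : (j : Int) ≤ (k : Int) := hle
      omega
    have hsnd : ((pvPairs all_phrases).getD r ("", 0)).2 = (k : Int) := by
      rw [hpj]
      show (j : Int) = (k : Int)
      omega
    rw [hsnd]

-- ===== VERDICT (by name: the statement is the Claim_ definition above) =====
theorem get_phrase_indices_spec : Claim_equal_get_phrase_indices := by
  intro known all _
  unfold Spec_get_phrase_indices get_phrase_indices get_phrase_indices_alt
  congr 1
  funext s phrase
  exact step_eq all phrase s
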